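-- pv_equiv track=rewrite | github.com/hojoungjang/programming-exercises | 수식복원하기/수식복원하기.py | convert_num_to_decimal
-- ===== SOURCE A (Python) =====
-- def convert_num_to_decimal(num, base):
--     result = 0
--     pwr = 0
--     while num > 0:
--         num, digit = divmod(num, 10)
--         result += digit * pow(base, pwr)
--         pwr += 1
--     return result
-- ===== SOURCE B (Python) =====
-- def convert_num_to_decimal(num, base):
--     digits = []
--     while num > 0:
--         num, d = divmod(num, 10)
--         digits.append(d)
--     result = 0
--     for d in reversed(digits):
--         result = result * base + d
--     return result
-- ===== Notes on version B (the rewrite author's own statement) =====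
-- stated objective: alternative
-- what changed: B replaces A's single positional-sum loop (digit * base**pwr with a running power counter) by Horner's method: it first collects the decimal digits and then folds them most-significant-first with result = result*base + d, never computing a power.
import Mathlib
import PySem

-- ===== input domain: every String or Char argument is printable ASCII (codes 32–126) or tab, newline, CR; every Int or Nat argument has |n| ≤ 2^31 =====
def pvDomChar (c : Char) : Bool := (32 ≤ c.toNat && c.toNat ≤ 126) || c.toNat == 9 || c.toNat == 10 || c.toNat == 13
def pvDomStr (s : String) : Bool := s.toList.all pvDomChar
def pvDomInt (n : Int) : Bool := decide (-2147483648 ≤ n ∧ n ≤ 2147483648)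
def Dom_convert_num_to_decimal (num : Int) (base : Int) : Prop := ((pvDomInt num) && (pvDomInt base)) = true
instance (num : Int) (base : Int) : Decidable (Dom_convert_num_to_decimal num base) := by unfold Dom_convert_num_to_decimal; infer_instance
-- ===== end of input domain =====

-- B replaces A's positional sum (digit * base**pwr per step) by Horner's method over the
-- collected digit list; same return value, no exponentiation (objective: alternative).

-- termination helper cited by the recursive definitions below
theorem pv_fd_toNat_lt (num : Int) (h : 0 < num) :
    (PySem.Int.floordiv num 10).toNat < num.toNat := by
  rw [PySem.Int.floordiv_eq_ediv_of_pos (by norm_num : (0:Int) < 10)]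
  omega

-- ===== PORT A =====
-- A's while-loop: num,digit = divmod(num,10); result += digit * pow(base,pwr); pwr += 1
-- (pwr stays ≥ 0 throughout, so pow(base,pwr) is base ^ pwr.toNat)
def pvALoop (num base result pwr : Int) : Int :=
  if h : 0 < num then
    pvALoop (PySem.Int.floordiv num 10) base
      (result + PySem.Int.mod num 10 * base ^ pwr.toNat) (pwr + 1)
  else result
termination_by num.toNat
decreasing_by exact pv_fd_toNat_lt num h

def convert_num_to_decimal (num : Int) (base : Int) : Int :=
  pvALoop num base 0 0

-- ===== PORT B =====
-- B's first loop: digits.append(d) for each divmod step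
def pvBDigits (num : Int) (digits : List Int) : List Int :=
  if h : 0 < num then
    pvBDigits (PySem.Int.floordiv num 10) (digits ++ [PySem.Int.mod num 10])
  else digits
termination_by num.toNat
decreasing_by exact pv_fd_toNat_lt num h

-- B's second loop: for d in reversed(digits): result = result * base + d
def convert_num_to_decimal_alt (num : Int) (base : Int) : Int :=
  (pvBDigits num []).reverse.foldl (fun result d => result * base + d) 0

-- ===== PRECONDITION & SPEC =====
def Spec_convert_num_to_decimal (num : Int) (base : Int) (out : Int) : Prop := out = convert_num_to_decimal_alt num base
instance (num : Int) (base : Int) (out : Int) : Decidable (Spec_convert_num_to_decimal num base out) := by unfold Spec_convert_num_to_decimal; infer_instance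

-- ===== CLAIM (what is proved, stated in full; the proofs are below) =====
def Claim_equal_convert_num_to_decimal : Prop := ∀ (num : Int) (base : Int), Dom_convert_num_to_decimal num base → Spec_convert_num_to_decimal num base (convert_num_to_decimal num base)

-- ===== LEMMAS AND PROOFS =====

-- common reference value: G num = d0 + base * G (num // 10), G (num ≤ 0) = 0
def pvG (num base : Int) : Int :=
  if h : 0 < num then
    PySem.Int.mod num 10 + base * pvG (PySem.Int.floordiv num 10) base
  else 0
termination_by num.toNat
decreasing_by exact pv_fd_toNat_lt num h

theorem pvALoop_eq (k : Nat) : ∀ (num base result pwr : Int), num.toNat ≤ k → 0 ≤ pwr →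
    pvALoop num base result pwr = result + base ^ pwr.toNat * pvG num base := by
  induction k with
  | zero =>
    intro num base result pwr hk _
    rw [pvALoop, pvG]
    have : ¬ 0 < num := by omega
    simp [this]
  | succ k ih =>
    intro num base result pwr hk hp
    rw [pvALoop, pvG]
    by_cases h : 0 < num
    · simp only [h, dif_pos]
      have hlt := pv_fd_toNat_lt num h
      rw [ih _ base _ (pwr + 1) (by omega) (by omega)]
      have hpt : (pwr + 1).toNat = pwr.toNat + 1 := by omega
      rw [hpt, pow_succ]
      ring
    · simp [h]

theorem pvBDigits_append (k : Nat) : ∀ (num : Int) (acc : List Int), num.toNat ≤ k →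
    pvBDigits num acc = acc ++ pvBDigits num [] := by
  induction k with
  | zero =>
    intro num acc hk
    have h : ¬ 0 < num := by omega
    conv_lhs => rw [pvBDigits]
    rw [dif_neg h]
    conv_rhs => rw [pvBDigits]
    rw [dif_neg h]
    simp
  | succ k ih =>
    intro num acc hk
    by_cases h : 0 < num
    · have hlt := pv_fd_toNat_lt num h
      conv_lhs => rw [pvBDigits]
      rw [dif_pos h]
      conv_rhs => rw [pvBDigits]
      rw [dif_pos h]
      rw [ih _ (acc ++ [PySem.Int.mod num 10]) (by omega),
          ih (PySem.Int.floordiv num 10) ([] ++ [PySem.Int.mod num 10]) (by omega)]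
      simp
    · conv_lhs => rw [pvBDigits]
      rw [dif_neg h]
      conv_rhs => rw [pvBDigits]
      rw [dif_neg h]
      simp

theorem pvHorner_eq (k : Nat) : ∀ (num base : Int), num.toNat ≤ k →
    (pvBDigits num []).reverse.foldl (fun result d => result * base + d) 0 = pvG num base := by
  induction k with
  | zero =>
    intro num base hk
    rw [pvBDigits, pvG]
    have : ¬ 0 < num := by omega
    simp [this]
  | succ k ih =>
    intro num base hk
    by_cases h : 0 < num
    · have hlt := pv_fd_toNat_lt num h
      have hstep : pvBDigits num [] =
          [PySem.Int.mod num 10] ++ pvBDigits (PySem.Int.floordiv num 10) [] := by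
        conv_lhs => rw [pvBDigits]
        rw [dif_pos h]
        simpa using pvBDigits_append k _ [PySem.Int.mod num 10] (by omega)
      rw [hstep]
      rw [pvG]
      simp only [h, dif_pos]
      rw [List.reverse_append, List.foldl_append]
      rw [ih _ base (by omega)]
      simp [List.foldl]
      ring
    · rw [pvBDigits, pvG]
      simp [h]

-- ===== VERDICT (by name: the statement is the Claim_ definition above) =====
theorem convert_num_to_decimal_spec : Claim_equal_convert_num_to_decimal := by
  intro num base _
  unfold Spec_convert_num_to_decimal convert_num_to_decimal convert_num_to_decimal_alt
  rw [pvALoop_eq num.toNat num base 0 0 (le_refl _) (le_refl _),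
      pvHorner_eq num.toNat num base (le_refl _)]
  simp
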